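-- pv_equiv track=rewrite | github.com/conorsch/jams | jams.py | _str_is_note
-- ===== SOURCE A (Python) =====
-- OCTAVES = list(range(1, 6))
--
-- def _str_is_note(given_note):
--     legal_roots = ['a', 'b', 'c', 'd', 'e', 'f', 'g']
--     modifiers = ['#', 'b']
--     octaves = [str(o) for o in OCTAVES]
--
--     root_is_legit = given_note[0] in legal_roots
--
--     if root_is_legit:
--         if len(given_note) == 1:
--             return True
--
--         if len(given_note) == 2:
--             if given_note[1] in modifiers + octaves:
--                 return True
--             else:
--                 return False
--
--         if len(given_note) == 3:
--             if given_note[1] in modifiers and given_note[2] in octaves: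
--                 return True
--
--     return False
-- ===== SOURCE B (Python) =====
-- def _str_is_note(given_note):
--     root = given_note[0]
--     if root not in 'abcdefg':
--         return False
--     rest = given_note[1:]
--     if rest and rest[0] in '#b':
--         rest = rest[1:]
--     if rest and rest[0] in '12345':
--         rest = rest[1:]
--     return not rest
-- ===== Notes on version B (the rewrite author's own statement) =====
-- stated objective: simpler
-- what changed: Replaced the length-cased branch tree over root/modifier/octave lists with a linear parse that strips an optional modifier then an optional octave and checks the remainder is empty.
import Mathlib
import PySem

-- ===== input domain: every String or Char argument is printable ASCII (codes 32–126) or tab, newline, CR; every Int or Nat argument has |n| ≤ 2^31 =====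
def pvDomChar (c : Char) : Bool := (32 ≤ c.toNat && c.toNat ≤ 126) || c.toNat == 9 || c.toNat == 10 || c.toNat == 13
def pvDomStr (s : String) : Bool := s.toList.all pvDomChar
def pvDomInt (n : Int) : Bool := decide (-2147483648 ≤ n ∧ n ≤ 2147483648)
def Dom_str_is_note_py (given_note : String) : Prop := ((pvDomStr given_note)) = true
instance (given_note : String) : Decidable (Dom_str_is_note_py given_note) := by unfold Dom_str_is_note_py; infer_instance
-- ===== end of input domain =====

-- B replaces A's branch tree on the string length by a linear strip-and-check parse (objective: simpler).

-- ===== PORT A =====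
def str_is_note_py (given_note : String) : Bool :=
  let legal_roots : List Char := ['a', 'b', 'c', 'd', 'e', 'f', 'g']
  let modifiers : List Char := ['#', 'b']
  let octaves : List Char := ['1', '2', '3', '4', '5']
  match PySem.Str.pyGet? given_note 0 with
  | none => false  -- IndexError on the empty string; excluded by Pre_
  | some c0 =>
    let root_is_legit := legal_roots.contains c0
    if root_is_legit then
      if PySem.Str.len given_note = 1 then true
      else if PySem.Str.len given_note = 2 then
        (match PySem.Str.pyGet? given_note 1 with
         | some c1 => (modifiers ++ octaves).contains c1
         | none => false)
      else if PySem.Str.len given_note = 3 then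
        (match PySem.Str.pyGet? given_note 1, PySem.Str.pyGet? given_note 2 with
         | some c1, some c2 => modifiers.contains c1 && octaves.contains c2
         | _, _ => false)
      else false
    else false

-- ===== PORT B =====
def str_is_note_py_alt (given_note : String) : Bool :=
  match given_note.toList with
  | [] => false  -- IndexError on the empty string; excluded by Pre_
  | root :: rest =>
    if !(['a', 'b', 'c', 'd', 'e', 'f', 'g'].contains root) then false
    else
      let r1 := match rest with
        | m :: t => if ['#', 'b'].contains m then t else m :: t
        | [] => []
      let r2 := match r1 with
        | o :: t => if ['1', '2', '3', '4', '5'].contains o then t else o :: t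
        | [] => []
      r2.isEmpty

-- ===== PRECONDITION & SPEC =====
-- Pre_ excludes exactly the empty string, on which both Pythons raise IndexError at given_note[0].
def Pre_str_is_note_py (given_note : String) : Prop := given_note.toList ≠ []
instance (given_note : String) : Decidable (Pre_str_is_note_py given_note) := by unfold Pre_str_is_note_py; infer_instance
def pvWitness_str_is_note_py : String := "c#4"
def Spec_str_is_note_py (given_note : String) (out : Bool) : Prop := out = str_is_note_py_alt given_note
instance (given_note : String) (out : Bool) : Decidable (Spec_str_is_note_py given_note out) := by unfold Spec_str_is_note_py; infer_instance

-- ===== CLAIM (what is proved, stated in full; the proofs are below) =====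
def Claim_equal_str_is_note_py : Prop := ∀ (given_note : String), Dom_str_is_note_py given_note → Pre_str_is_note_py given_note → Spec_str_is_note_py given_note (str_is_note_py given_note)

-- ===== LEMMAS AND PROOFS =====

-- ===== VERDICT (by name: the statement is the Claim_ definition above) =====
theorem pv_pg0 (x : Char) (xs : List Char) : PySem.List.pyGet? (x :: xs) 0 = some x := by
  simpa using PySem.List.pyGet?_natCast (x :: xs) 0

theorem pv_pg1 (x y : Char) (xs : List Char) : PySem.List.pyGet? (x :: y :: xs) 1 = some y := by
  simpa using PySem.List.pyGet?_natCast (x :: y :: xs) 1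

theorem pv_pg2 (x y z : Char) (xs : List Char) : PySem.List.pyGet? (x :: y :: z :: xs) 2 = some z := by
  simpa using PySem.List.pyGet?_natCast (x :: y :: z :: xs) 2

set_option maxHeartbeats 1000000 in
theorem str_is_note_py_spec : Claim_equal_str_is_note_py := by
  intro s _ hp
  unfold Spec_str_is_note_py
  rcases h : s.toList with _ | ⟨a, _ | ⟨b, _ | ⟨c, _ | ⟨d, t⟩⟩⟩⟩
  · exact absurd h hp
  -- length 1
  · simp only [str_is_note_py, str_is_note_py_alt, PySem.Str.len_eq, h]
    simp only [h, pv_pg0, List.length_cons, List.length_nil]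
    try norm_num
    try simp only [h, pv_pg0]
    try first | rfl | simp [h, pv_pg0]
  -- length 2
  · simp only [str_is_note_py, str_is_note_py_alt, PySem.Str.len_eq, h]
    simp only [h, pv_pg0, pv_pg1, List.length_cons, List.length_nil]
    try norm_num
    try simp only [h, pv_pg0, pv_pg1]
    try norm_num
    by_cases hb1 : b = '#' ∨ b = 'b'
    · rcases hb1 with rfl | rfl <;> simp [h, pv_pg0, pv_pg1]
    · by_cases hb2 : b = '1' ∨ b = '2' ∨ b = '3' ∨ b = '4' ∨ b = '5'
      · rcases hb2 with rfl | rfl | rfl | rfl | rfl <;> simp [h, pv_pg0, pv_pg1]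
      · push_neg at hb1 hb2
        simp [h, pv_pg0, pv_pg1, hb1.1, hb1.2, hb2.1, hb2.2.1, hb2.2.2.1, hb2.2.2.2.1,
          hb2.2.2.2.2]
  -- length 3
  · simp only [str_is_note_py, str_is_note_py_alt, PySem.Str.len_eq, h]
    simp only [h, pv_pg0, pv_pg1, pv_pg2, List.length_cons, List.length_nil]
    try norm_num
    try simp only [h, pv_pg0, pv_pg1, pv_pg2]
    try norm_num
    by_cases hc2 : c = '1' ∨ c = '2' ∨ c = '3' ∨ c = '4' ∨ c = '5'
    · by_cases hb1 : b = '#' ∨ b = 'b'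
      · rcases hb1 with rfl | rfl <;> rcases hc2 with rfl | rfl | rfl | rfl | rfl <;>
          simp [h, pv_pg0, pv_pg1, pv_pg2]
      · push_neg at hb1
        rcases hc2 with rfl | rfl | rfl | rfl | rfl <;>
          · simp [h, pv_pg0, pv_pg1, pv_pg2, hb1.1, hb1.2]
            try intro _
            try split_ifs <;> simp
    · push_neg at hc2
      by_cases hb1 : b = '#' ∨ b = 'b'
      · rcases hb1 with rfl | rfl <;>
          simp [h, pv_pg0, pv_pg1, pv_pg2, hc2.1, hc2.2.1, hc2.2.2.1, hc2.2.2.2.1, hc2.2.2.2.2]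
      · push_neg at hb1
        simp [h, pv_pg0, pv_pg1, pv_pg2, hb1.1, hb1.2, hc2.1, hc2.2.1, hc2.2.2.1, hc2.2.2.2.1,
          hc2.2.2.2.2]
        try split_ifs <;> simp
  -- length ≥ 4
  · simp only [str_is_note_py, str_is_note_py_alt, PySem.Str.len_eq, h]
    simp only [h, pv_pg0, pv_pg1, pv_pg2, List.length_cons, List.length_nil]
    try norm_num
    try simp only [h, pv_pg0, pv_pg1, pv_pg2]
    try norm_num
    have l1 : ¬((t.length : Int) + 1 + 1 + 1 = 0) := by omega
    have l2 : ¬((t.length : Int) + 1 + 1 + 1 + 1 = 2) := by omega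
    have l3 : ¬((t.length : Int) + 1 + 1 + 1 + 1 = 3) := by omega
    simp [l1, l2, l3]
    try split_ifs <;> (intro _; try simp; try split_ifs <;> simp)
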